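-- pv_equiv track=rewrite | github.com/emrearslandogan/homeworks | ceng111/the2/tester/tester/the2.py | rule7
-- ===== SOURCE A (Python) =====
-- def exponentAdder(days):
--     if days > 0:
--         return (1 - pow(5,days)) // -4 -1 # used geometrical series'es feature
--
--     else:
--         return 0
--
-- def rule7(calendar, cost, final_errors): # neighbour, monday, tuesday and wednesday
--
--     # finding days
--     enumcalendar = enumerate(calendar)
--     ndays = list(filter(lambda x: x[1] == "n", enumcalendar))
--     ndaysfinal = [t[0] for t in ndays]
--
--     temp = [t % 5 for t in ndaysfinal]
--
--     if (3 in temp or 4 in temp):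
--         final_errors.append(7)
--         return cost, final_errors
--
--     else:
--         cost += exponentAdder(len(ndaysfinal))
--         return cost, final_errors
-- ===== SOURCE B (Python) =====
-- def rule7(calendar, cost, final_errors):  # neighbour, monday, tuesday and wednesday
--     # single pass: count 'n' days and detect a bad (index % 5 in {3,4}) position
--     count = 0
--     bad = False
--     for i, day in enumerate(calendar):
--         if day == "n":
--             count += 1
--             if i % 5 == 3 or i % 5 == 4:
--                 bad = True
--     if bad:
--         final_errors.append(7)
--         return cost, final_errors
--     # iterative geometric accumulation: total = 5 + 25 + ... + 5**(count-1)
--     total = 0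
--     p = 5
--     for _ in range(count - 1):
--         total += p
--         p *= 5
--     return cost + total, final_errors
-- ===== Notes on version B (the rewrite author's own statement) =====
-- stated objective: simpler
-- what changed: B makes one fused pass over enumerate(calendar) keeping only a count and a bad-flag (no intermediate filtered/index/mod lists), and replaces the closed-form geometric formula (1-5**n)//-4-1 with an explicit accumulation loop summing 5**k for k=1..count-1.
import Mathlib
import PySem

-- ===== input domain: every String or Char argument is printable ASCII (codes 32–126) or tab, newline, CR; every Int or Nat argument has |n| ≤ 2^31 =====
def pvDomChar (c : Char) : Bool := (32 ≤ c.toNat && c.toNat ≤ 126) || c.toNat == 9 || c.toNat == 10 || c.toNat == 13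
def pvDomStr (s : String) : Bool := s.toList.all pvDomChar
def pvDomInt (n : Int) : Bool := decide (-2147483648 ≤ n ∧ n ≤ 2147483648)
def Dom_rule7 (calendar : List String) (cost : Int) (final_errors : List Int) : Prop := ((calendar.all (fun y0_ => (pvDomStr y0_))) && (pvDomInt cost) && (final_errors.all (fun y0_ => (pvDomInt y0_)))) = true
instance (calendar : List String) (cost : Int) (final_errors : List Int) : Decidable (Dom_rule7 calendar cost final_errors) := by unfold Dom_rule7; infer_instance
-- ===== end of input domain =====

-- B fuses A's filter/map/map passes into one counting pass and replaces the closed-form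
-- geometric formula by an accumulation loop (objective: simpler).  A appends 7 to the
-- final_errors list in place; B performs the same mutation; the equivalence proved here
-- is about the returned pair.

-- ===== PORT A =====
def exponentAdder (days : Int) : Int :=
  if days > 0 then
    -- pow(5, days): here days is a list length (≥ 0 whenever called), so 5 ^ days.toNat is exact
    PySem.Int.floordiv (1 - 5 ^ days.toNat) (-4) - 1
  else 0

def rule7 (calendar : List String) (cost : Int) (final_errors : List Int) : Int × List Int :=
  let enumcalendar := PySem.List.enumerate calendar
  let ndays := enumcalendar.filter (fun x => x.2 == "n")
  let ndaysfinal := ndays.map (fun t => t.1)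
  let temp := ndaysfinal.map (fun t => PySem.Int.mod t 5)
  if temp.contains 3 || temp.contains 4 then
    (cost, final_errors ++ [7])
  else
    (cost + exponentAdder (ndaysfinal.length : Int), final_errors)

-- ===== PORT B =====
def rule7_alt (calendar : List String) (cost : Int) (final_errors : List Int) : Int × List Int :=
  let st := (PySem.List.enumerate calendar).foldl
    (fun (s : Int × Bool) x =>
      if x.2 == "n" then
        (s.1 + 1, s.2 || (PySem.Int.mod x.1 5 == 3 || PySem.Int.mod x.1 5 == 4))
      else s)
    (0, false)
  if st.2 then
    (cost, final_errors ++ [7])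
  else
    let tp := (PySem.List.pyRange 0 (st.1 - 1) 1).foldl
      (fun (s : Int × Int) _ => (s.1 + s.2, s.2 * 5)) (0, 5)
    (cost + tp.1, final_errors)

-- ===== PRECONDITION & SPEC =====
def Spec_rule7 (calendar : List String) (cost : Int) (final_errors : List Int) (out : Int × List Int) : Prop := out = rule7_alt calendar cost final_errors
instance (calendar : List String) (cost : Int) (final_errors : List Int) (out : Int × List Int) : Decidable (Spec_rule7 calendar cost final_errors out) := by unfold Spec_rule7; infer_instance

-- ===== CLAIM (what is proved, stated in full; the proofs are below) =====
def Claim_equal_rule7 : Prop := ∀ (calendar : List String) (cost : Int) (final_errors : List Int), Dom_rule7 calendar cost final_errors → Spec_rule7 calendar cost final_errors (rule7 calendar cost final_errors)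

-- ===== LEMMAS AND PROOFS =====

-- the per-element "bad index" test of B
def pvBad (x : Int × String) : Bool :=
  x.2 == "n" && (PySem.Int.mod x.1 5 == 3 || PySem.Int.mod x.1 5 == 4)

-- B's counting fold, characterized
theorem foldl_count_bad (L : List (Int × String)) (c : Int) (b : Bool) :
    L.foldl (fun (s : Int × Bool) x =>
        if x.2 == "n" then
          (s.1 + 1, s.2 || (PySem.Int.mod x.1 5 == 3 || PySem.Int.mod x.1 5 == 4))
        else s) (c, b)
    = (c + (L.countP (fun x => x.2 == "n") : Int), b || L.any pvBad) := by
  induction L generalizing c b with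
  | nil => simp
  | cons x xs ih =>
    simp only [List.foldl_cons, List.countP_cons, List.any_cons]
    by_cases hx : (x.2 == "n") = true
    · rw [if_pos hx, ih]
      simp only [Prod.mk.injEq, hx, if_true, pvBad]
      refine ⟨by push_cast; ring, ?_⟩
      simp [Bool.or_assoc]
    · rw [if_neg hx, ih]
      simp [pvBad, hx]

-- A's membership test equals B's any-test
theorem contains_eq_any (L : List (Int × String)) :
    ((((L.filter (fun x => x.2 == "n")).map (fun t => t.1)).map
        (fun t => PySem.Int.mod t 5)).contains 3
      || (((L.filter (fun x => x.2 == "n")).map (fun t => t.1)).map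
        (fun t => PySem.Int.mod t 5)).contains 4)
    = L.any pvBad := by
  rw [Bool.eq_iff_iff]
  simp only [Bool.or_eq_true, List.any_eq_true, List.contains_iff_mem, List.mem_map,
    List.mem_filter, pvBad, Bool.and_eq_true, beq_iff_eq]
  constructor
  · rintro (⟨t, ⟨x, ⟨hx, hn⟩, rfl⟩, h⟩ | ⟨t, ⟨x, ⟨hx, hn⟩, rfl⟩, h⟩) <;> aesop
  · rintro ⟨x, hx, hn, h3 | h4⟩
    · exact Or.inl ⟨x.1, ⟨x, ⟨hx, hn⟩, rfl⟩, h3⟩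
    · exact Or.inr ⟨x.1, ⟨x, ⟨hx, hn⟩, rfl⟩, h4⟩

-- geometric sum  g n = 5^0 + 5^1 + ... + 5^(n-1)
def pvG : Nat → Int
  | 0 => 0
  | n + 1 => pvG n + 5 ^ n

theorem pvG_closed (n : Nat) : 4 * pvG n + 1 = 5 ^ n := by
  induction n with
  | zero => simp [pvG]
  | succ n ih => simp [pvG, pow_succ]; linarith

-- B's accumulation loop, characterized
theorem foldl_geom (m : Nat) (t p : Int) :
    (PySem.List.pyRange 0 m 1).foldl
      (fun (s : Int × Int) _ => (s.1 + s.2, s.2 * 5)) (t, p)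
    = (t + p * pvG m, p * 5 ^ m) := by
  induction m generalizing t p with
  | zero => simp [pvG]
  | succ m ih =>
    have h : PySem.List.pyRange 0 ((m : Int) + 1) 1
        = PySem.List.pyRange 0 (m : Int) 1 ++ [(m : Int)] :=
      PySem.List.pyRange_one_succ_right (by positivity)
    push_cast
    rw [h, List.foldl_append, ih]
    simp only [List.foldl_cons, List.foldl_nil, Prod.mk.injEq, pvG, pow_succ]
    constructor <;> ring

theorem rule7_eq (calendar : List String) (cost : Int) (final_errors : List Int) :
    rule7 calendar cost final_errors = rule7_alt calendar cost final_errors := by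
  unfold rule7 rule7_alt
  simp only []
  set L := PySem.List.enumerate calendar with hL
  rw [foldl_count_bad, contains_eq_any]
  cases hbad : L.any pvBad with
  | true => simp
  | false =>
    simp only [Bool.or_false, if_neg (Bool.false_ne_true)]
    set c : Nat := L.countP (fun x => x.2 == "n") with hc
    have hlen : (((L.filter (fun x => x.2 == "n")).map (fun t => t.1)).length : Int) = (c : Int) := by
      simp [hc, List.countP_eq_length_filter]
    rw [hlen]
    unfold exponentAdder
    cases c with
    | zero =>
      simp
    | succ m =>
      have hpos : ((m + 1 : Nat) : Int) > 0 := by positivity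
      rw [if_pos hpos]
      have : (0 : Int) + ((m + 1 : Nat) : Int) - 1 = (m : Int) := by push_cast; ring
      rw [this, foldl_geom]
      have hclosed := pvG_closed (m + 1)
      have htoNat : ((m + 1 : Nat) : Int).toNat = m + 1 := by simp
      rw [htoNat]
      have hfac : 1 - (5 : Int) ^ (m + 1) = (1 + 5 * pvG m) * (-4) := by
        have := pvG_closed m
        simp [pvG] at hclosed
        linarith
      rw [hfac]
      have hdiv : PySem.Int.floordiv ((1 + 5 * pvG m) * (-4)) (-4) = 1 + 5 * pvG m := by
        simp only [PySem.Int.floordiv]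
        exact Int.mul_fdiv_cancel _ (by norm_num)
      rw [hdiv]
      simp

-- ===== VERDICT (by name: the statement is the Claim_ definition above) =====
theorem rule7_spec : Claim_equal_rule7 := by
  intro calendar cost final_errors _
  unfold Spec_rule7
  exact rule7_eq calendar cost final_errors
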